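-- pv_equiv track=rewrite | github.com/VitorNova/lazaro_real | production/agente-ia/fix-billing-templates-standalone.py | fix_messages_dict
-- ===== SOURCE A (Python) =====
-- from typing import Any, Dict, List
--
-- def fix_template_newlines(template: str) -> str:
--     """
--     Corrige newlines em um template.
--
--     Substitui \\n (backslash-n literais) por quebras de linha reais.
--     """
--     if not template:
--         return template
--
--     fixed = template.replace('\\n', '\n')
--     fixed = fixed.replace('\\t', '\t')
--     fixed = fixed.replace('\\r', '\r')
--
--     return fixed
--
-- def fix_messages_dict(messages: Dict[str, str]) -> Dict[str, str]:
--     """Corrige todos os templates em um dict de mensagens."""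
--     fixed = {}
--     for key, template in messages.items():
--         if isinstance(template, str):
--             fixed[key] = fix_template_newlines(template)
--         else:
--             fixed[key] = template
--     return fixed
-- ===== SOURCE B (Python) =====
-- _MAP = {'n': '\n', 't': '\t', 'r': '\r'}
--
-- def _unescape(s):
--     out = []
--     i = 0
--     n = len(s)
--     while i < n:
--         if s[i] == '\\' and i + 1 < n and s[i + 1] in _MAP:
--             out.append(_MAP[s[i + 1]])
--             i += 2
--         else:
--             out.append(s[i])
--             i += 1
--     return ''.join(out)
--
-- def fix_messages_dict(messages):
--     return {key: _unescape(template) if isinstance(template, str) else template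
--             for key, template in messages.items()}
-- ===== Notes on version B (the rewrite author's own statement) =====
-- stated objective: alternative
-- what changed: Replaces the three chained full-string str.replace passes with a single left-to-right table-driven scan that resolves each '\'+[ntr] escape in one pass, and builds the result dict with a comprehension instead of an explicit loop.
import Mathlib
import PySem

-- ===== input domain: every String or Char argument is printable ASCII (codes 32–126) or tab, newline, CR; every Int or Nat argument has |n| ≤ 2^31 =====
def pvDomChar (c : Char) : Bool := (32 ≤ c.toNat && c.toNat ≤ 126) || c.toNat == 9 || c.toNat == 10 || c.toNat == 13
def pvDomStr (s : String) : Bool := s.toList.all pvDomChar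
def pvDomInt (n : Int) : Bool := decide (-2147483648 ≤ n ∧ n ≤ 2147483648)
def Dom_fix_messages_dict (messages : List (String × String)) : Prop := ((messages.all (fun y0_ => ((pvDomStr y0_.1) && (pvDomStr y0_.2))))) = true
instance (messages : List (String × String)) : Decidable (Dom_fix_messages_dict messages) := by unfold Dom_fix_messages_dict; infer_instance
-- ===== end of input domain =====

-- B replaces A's three chained full-string replace passes by one left-to-right
-- table-driven scan resolving each '\'+[ntr] escape (objective: alternative).

-- ===== PORT A =====
-- literal port of fix_template_newlines: empty-string early return, then the
-- three chained str.replace passes (PySem.Str.replace is Python-exact)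
def fix_template_newlines (template : String) : String :=
  if template = "" then template
  else
    let fixed := PySem.Str.replace template "\\n" "\n"
    let fixed := PySem.Str.replace fixed "\\t" "\t"
    let fixed := PySem.Str.replace fixed "\\r" "\r"
    fixed

-- the for-loop over messages.items() building dict 'fixed'; at type String the
-- isinstance(template, str) test is always true, so its then-branch is taken
def fix_messages_dict (messages : List (String × String)) : List (String × String) :=
  (messages.foldl (fun fixed kv => fixed.insert kv.1 (fix_template_newlines kv.2))
    (PySem.Dict.empty : PySem.Dict String String)).items

-- ===== PORT B =====
-- port of _unescape's while loop: one scan over the characters, looking at the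
-- current char and (when it is a backslash) the next one, consuming one or two
-- chars per step exactly as the Python loop advances i by 1 or 2
def unescChars : List Char → List Char
  | [] => []
  | [c] => [c]
  | c :: d :: t =>
    if c = '\\' then
      if d = 'n' then '\n' :: unescChars t
      else if d = 't' then '\t' :: unescChars t
      else if d = 'r' then '\r' :: unescChars t
      else c :: unescChars (d :: t)
    else c :: unescChars (d :: t)

def unescStr (s : String) : String := String.ofList (unescChars s.toList)

-- port of B's dict comprehension (a dict built by inserting each pair in order)
def fix_messages_dict_alt (messages : List (String × String)) : List (String × String) :=
  (messages.foldl (fun fixed kv => fixed.insert kv.1 (unescStr kv.2))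
    (PySem.Dict.empty : PySem.Dict String String)).items

-- ===== PRECONDITION & SPEC =====
def Spec_fix_messages_dict (messages : List (String × String)) (out : List (String × String)) : Prop := out = fix_messages_dict_alt messages
instance (messages : List (String × String)) (out : List (String × String)) : Decidable (Spec_fix_messages_dict messages out) := by unfold Spec_fix_messages_dict; infer_instance

-- ===== CLAIM (what is proved, stated in full; the proofs are below) =====
def Claim_equal_fix_messages_dict : Prop := ∀ (messages : List (String × String)), Dom_fix_messages_dict messages → Spec_fix_messages_dict messages (fix_messages_dict messages)

-- ===== LEMMAS AND PROOFS =====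

-- recursive characterisation of one str.replace pass with a 2-char pattern [a,b]
-- replaced by the 1-char [r]
def sub2 (a b r : Char) : List Char → List Char
  | [] => []
  | [c] => [c]
  | c :: d :: t => if c = a ∧ d = b then r :: sub2 a b r t else c :: sub2 a b r (d :: t)

lemma replace_go_eq (a b r : Char) :
    ∀ (fuel : Nat) (l acc : List Char), l.length ≤ fuel →
      PySem.Chars.replace.go [a, b] [r] fuel l acc = acc.reverse ++ sub2 a b r l := by
  intro fuel
  induction fuel with
  | zero =>
    intro l acc h
    have : l = [] := by cases l <;> simp_all
    subst this
    rw [PySem.Chars.replace.go]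
    simp [sub2]
  | succ n ih =>
    intro l acc h
    cases l with
    | nil =>
      rw [PySem.Chars.replace.go]
      simp [sub2]
      omega
    | cons c t =>
      cases t with
      | nil =>
        rw [PySem.Chars.replace.go]
        have : [a,b].isPrefixOf [c] = false := by simp [List.isPrefixOf]
        rw [this]
        simp only [Bool.false_eq_true, if_false]
        rw [ih [] (c::acc) (by simp)]
        simp [sub2]
      | cons d t' =>
        rw [PySem.Chars.replace.go]
        simp at h
        by_cases hm : c = a ∧ d = b
        · have : [a,b].isPrefixOf (c::d::t') = true := by
            simp [List.isPrefixOf, hm.1, hm.2]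
          rw [this]
          simp only [if_true]
          have hdrop : List.drop [a,b].length (c::d::t') = t' := by simp
          rw [hdrop, ih _ _ (by omega)]
          simp [sub2, hm]
        · have : [a,b].isPrefixOf (c::d::t') = false := by
            simp [List.isPrefixOf]
            intro h1 h2; exact absurd ⟨h1.symm, h2.symm⟩ hm
          rw [this]
          simp only [Bool.false_eq_true, if_false]
          rw [ih _ _ (by simp; omega)]
          simp [sub2, hm]

lemma replace_eq_sub2 (a b r : Char) (l : List Char) :
    PySem.Chars.replace l [a, b] [r] = sub2 a b r l := by
  rw [PySem.Chars.replace]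
  simp only [List.isEmpty, Bool.false_eq_true, if_false]
  rw [replace_go_eq a b r l.length l [] le_rfl]
  simp

lemma sub2_cons (a b r c : Char) (l : List Char) (h : ¬(c = a ∧ l.head? = some b)) :
    sub2 a b r (c :: l) = c :: sub2 a b r l := by
  cases l with
  | nil => simp [sub2]
  | cons d t =>
    rw [sub2]
    rw [if_neg (by simp at h; exact fun h1 => h h1.1 h1.2)]

lemma sub2_cons_ex (a b r c : Char) (l : List Char) :
    ∃ x m, sub2 a b r (c :: l) = x :: m ∧ (x = c ∨ x = r) := by
  cases l with
  | nil => exact ⟨c, [], by simp [sub2], Or.inl rfl⟩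
  | cons d t =>
    rw [sub2]
    by_cases hm : c = a ∧ d = b
    · exact ⟨r, _, by rw [if_pos hm], Or.inr rfl⟩
    · exact ⟨c, _, by rw [if_neg hm], Or.inl rfl⟩

-- the three chained passes compute exactly the one-pass scan
lemma pipe_eq_unesc (cs : List Char) :
    sub2 '\\' 'r' '\r' (sub2 '\\' 't' '\t' (sub2 '\\' 'n' '\n' cs)) = unescChars cs := by
  induction cs using unescChars.induct with
  | case1 => simp [sub2, unescChars]
  | case2 c => simp [sub2, unescChars]
  | case3 t ih =>
    rw [sub2, if_pos ⟨rfl, rfl⟩]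
    rw [sub2_cons _ _ _ _ _ (by simp), sub2_cons _ _ _ _ _ (by simp)]
    rw [unescChars, if_pos rfl, if_pos rfl, ih]
  | case4 t h1 ih =>
    rw [sub2, if_neg (by simp)]
    rw [sub2_cons '\\' 'n' '\n' 't' t (by simp)]
    rw [sub2, if_pos ⟨rfl, rfl⟩]
    rw [sub2_cons _ _ _ _ _ (by simp)]
    rw [unescChars, if_pos rfl, if_neg (by decide), if_pos rfl, ih]
  | case5 t h1 h2 ih =>
    rw [sub2, if_neg (by simp)]
    rw [sub2_cons '\\' 'n' '\n' 'r' t (by simp)]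
    rw [sub2, if_neg (by simp)]
    rw [sub2_cons '\\' 't' '\t' 'r' _ (by simp)]
    rw [sub2, if_pos ⟨rfl, rfl⟩]
    rw [unescChars, if_pos rfl, if_neg (by decide), if_neg (by decide), if_pos rfl, ih]
  | case6 d t hn ht hr ih =>
    rw [sub2, if_neg (by simp [hn])]
    obtain ⟨x, m, hx, hxor⟩ := sub2_cons_ex '\\' 'n' '\n' d t
    rw [hx, sub2, if_neg (by rcases hxor with h | h <;> subst h <;> simp [ht])]
    obtain ⟨y, m2, hy, hyor⟩ := sub2_cons_ex '\\' 't' '\t' x m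
    rw [hy, sub2, if_neg ?hyr]
    case hyr =>
      rintro ⟨-, hy2⟩
      rcases hyor with h | h <;> subst h
      · rcases hxor with h | h <;> subst h
        · exact hr hy2
        · exact absurd hy2 (by decide)
      · exact absurd hy2 (by decide)
    rw [← hy, ← hx, unescChars, if_pos rfl, if_neg hn, if_neg ht, if_neg hr, ih]
  | case7 c d t hc ih =>
    rw [sub2_cons _ _ _ _ _ (by simp [hc])]
    rw [sub2_cons _ _ _ _ _ (by simp [hc])]
    rw [sub2_cons _ _ _ _ _ (by simp [hc])]
    rw [unescChars, if_neg hc, ih]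

lemma fix_eq_unesc (s : String) : fix_template_newlines s = unescStr s := by
  unfold fix_template_newlines unescStr
  by_cases hs : s = ""
  · subst hs; rfl
  · rw [if_neg hs]
    simp only [PySem.Str.replace]
    rw [String.toList_ofList, String.toList_ofList]
    congr 1
    rw [show ("\\n" : String).toList = ['\\', 'n'] from rfl,
        show ("\\t" : String).toList = ['\\', 't'] from rfl,
        show ("\\r" : String).toList = ['\\', 'r'] from rfl,
        show ("\n" : String).toList = ['\n'] from rfl,
        show ("\t" : String).toList = ['\t'] from rfl,
        show ("\r" : String).toList = ['\r'] from rfl]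
    rw [replace_eq_sub2, replace_eq_sub2, replace_eq_sub2, pipe_eq_unesc]

-- ===== VERDICT (by name: the statement is the Claim_ definition above) =====
theorem fix_messages_dict_spec : Claim_equal_fix_messages_dict := by
  intro messages _
  unfold Spec_fix_messages_dict fix_messages_dict fix_messages_dict_alt
  congr 2
  funext fixed kv
  rw [fix_eq_unesc]
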